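-- pv_equiv track=rewrite | github.com/hnhaefliger/EulerProject | euler41.py | pandigital
-- ===== SOURCE A (Python) =====
-- def pandigital(i):
--     i = str(i)
--     n = len(i)
--     n = [str(j) for j in range(1, n+1)]
--
--     if all([j in n for j in i]) and all([i.count(j) == 1 for j in n]):
--         return True
--
--     else:
--         return False
-- ===== SOURCE B (Python) =====
-- def pandigital(i):
--     s = str(i)
--     return sorted(s) == [str(j) for j in range(1, len(s) + 1)]
-- ===== Notes on version B (the rewrite author's own statement) =====
-- stated objective: simpler
-- what changed: A's double scan (per-character membership test against the target list plus a substring count per target) is replaced by computing sorted(str(i)) once and comparing it with the target list.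
import Mathlib
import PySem

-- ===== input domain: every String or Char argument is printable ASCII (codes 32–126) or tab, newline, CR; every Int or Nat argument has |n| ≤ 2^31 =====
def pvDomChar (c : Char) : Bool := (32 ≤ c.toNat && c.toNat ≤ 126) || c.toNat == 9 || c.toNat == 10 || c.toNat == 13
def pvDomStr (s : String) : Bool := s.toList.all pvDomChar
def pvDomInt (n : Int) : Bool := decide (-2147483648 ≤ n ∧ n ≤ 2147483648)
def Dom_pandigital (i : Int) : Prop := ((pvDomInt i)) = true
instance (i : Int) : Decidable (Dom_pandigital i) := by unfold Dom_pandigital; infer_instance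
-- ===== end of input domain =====

-- B replaces A's double scan (membership test per character plus a count per target) by a
-- single sort-and-compare against the target list; objective: simpler.

-- ===== PORT A =====
def pandigital (i : Int) : Bool :=
  let s := PySem.Int.toStr i                 -- i = str(i)
  let n : Int := PySem.Str.len s             -- n = len(i)
  let n' : List String :=
    (PySem.List.pyRange 1 (n + 1)).map (fun j => PySem.Int.toStr j)   -- n = [str(j) for j in range(1, n+1)]
  if (s.toList.map (fun c => String.ofList [c])).all (fun j => n'.contains j)
      && n'.all (fun j => PySem.Str.count s j == 1) then
    true
  else
    false

-- ===== PORT B =====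
def pandigital_alt (i : Int) : Bool :=
  let s := PySem.Int.toStr i                 -- s = str(i)
  PySem.List.sorted (s.toList.map (fun c => String.ofList [c])) (fun x => x) false
    == (PySem.List.pyRange 1 (PySem.Str.len s + 1)).map (fun j => PySem.Int.toStr j)

-- ===== PRECONDITION & SPEC =====
def Spec_pandigital (i : Int) (out : Bool) : Prop := out = pandigital_alt i
instance (i : Int) (out : Bool) : Decidable (Spec_pandigital i out) := by unfold Spec_pandigital; infer_instance

-- ===== CLAIM (what is proved, stated in full; the proofs are below) =====
def Claim_equal_pandigital : Prop := ∀ (i : Int), Dom_pandigital i → Spec_pandigital i (pandigital i)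

-- ===== LEMMAS AND PROOFS =====

-- Python's s.count(sub) for a single-character sub is the character count.
lemma count_go_singleton (c : Char) (l : List Char) : ∀ (fuel acc : Nat), l.length ≤ fuel →
    PySem.Chars.count.go [c] fuel l acc = acc + l.count c := by
  induction l with
  | nil => intro fuel acc _; cases fuel <;> simp [PySem.Chars.count.go]
  | cons h t ih =>
    intro fuel acc hf
    cases fuel with
    | zero => simp at hf
    | succ f =>
      by_cases hch : c = h
      · subst hch
        simp [PySem.Chars.count.go, List.isPrefixOf, ih f (acc + 1) (by simpa using hf)]
        omega
      · simp [PySem.Chars.count.go, List.isPrefixOf, hch,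
          ih f acc (by simpa using hf), Ne.symm hch]

lemma chars_count_singleton (l : List Char) (c : Char) :
    PySem.Chars.count l [c] = l.count c := by
  simp [PySem.Chars.count, count_go_singleton c l l.length 0 le_rfl]

lemma count_go_of_not_infix (sub : List Char) :
    ∀ (fuel : Nat) (l : List Char) (acc : Nat), ¬ sub <:+: l →
      PySem.Chars.count.go sub fuel l acc = acc := by
  intro fuel
  induction fuel with
  | zero => intro l acc _; simp [PySem.Chars.count.go]
  | succ f ih =>
    intro l acc h
    cases l with
    | nil => simp [PySem.Chars.count.go]
    | cons hd tl =>
      have hpre : sub.isPrefixOf (hd :: tl) = false := by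
        by_contra hc
        exact h ((List.isPrefixOf_iff_prefix.mp (by simpa using hc)).isInfix)
      simp [PySem.Chars.count.go, hpre]
      exact ih tl acc (fun hinf => h (List.infix_cons hinf))

lemma infix_of_count_eq_one (l sub : List Char) (hs : sub ≠ [])
    (h : PySem.Chars.count l sub = 1) : sub <:+: l := by
  by_contra hinf
  rw [PySem.Chars.count] at h
  simp [List.isEmpty_iff, hs, count_go_of_not_infix sub l.length l 0 hinf] at h

-- `Nat.toDigitsCore` only ever adds characters in front of its accumulator.
lemma toDigitsCore_length_mono (b : Nat) : ∀ (f n : Nat) (ds : List Char),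
    ds.length ≤ (Nat.toDigitsCore b f n ds).length := by
  intro f
  induction f with
  | zero => intro n ds; simp [Nat.toDigitsCore]
  | succ f ih =>
    intro n ds
    rw [Nat.toDigitsCore]
    split
    · simp
    · exact le_trans (by simp) (ih (n / b) ((n % b).digitChar :: ds))

lemma toDigits_ne_single_zero (m : Nat) (hm : 1 ≤ m) : Nat.toDigits 10 m ≠ ['0'] := by
  intro h
  rw [Nat.toDigits, Nat.toDigitsCore] at h
  by_cases h10 : m / 10 = 0
  · have hlt : m < 10 := by omega
    rw [if_pos h10] at h
    have hch : (m % 10).digitChar = '0' := by simpa using h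
    have hm0 : m % 10 = m := Nat.mod_eq_of_lt hlt
    rw [hm0] at hch
    interval_cases m <;> exact absurd hch (by decide)
  · rw [if_neg h10] at h
    have hge : 10 ≤ m := by omega
    obtain ⟨g, rfl⟩ : ∃ g, m = g + 1 := ⟨m - 1, by omega⟩
    rw [Nat.toDigitsCore] at h
    have hlen : (2 : Nat) ≤ (['0'] : List Char).length := by
      rw [← h]
      split
      · simp
      · exact le_trans (by simp)
          (toDigitsCore_length_mono 10 g (((g + 1) / 10) / 10) _)
    simp at hlen

lemma toStr_ne_zero (j : Int) (hj : 1 ≤ j) : PySem.Int.toStr j ≠ "0" := by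
  intro h
  have h' := congrArg String.toList h
  rw [PySem.Int.toList_toStr] at h'
  rw [PySem.Int.toChars, if_neg (by omega)] at h'
  exact toDigits_ne_single_zero j.toNat (by omega) (by simpa using h')

-- The generic equivalence: against any strictly increasing list T of one-character strings,
-- A's membership-plus-count test agrees with "sorted characters = T".
lemma pandigital_generic (s : String) (T : List String)
    (h1 : ∀ t ∈ T, t.toList.length = 1)
    (h2 : T.Pairwise (fun a b => a < b)) :
    ((s.toList.map (fun c => String.ofList [c])).all (fun j => T.contains j)
        && T.all (fun t => PySem.Str.count s t == 1))
      = (PySem.List.sorted (s.toList.map (fun c => String.ofList [c])) (fun x => x) false == T) := by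
  have hfinj : Function.Injective (fun c : Char => String.ofList [c]) := by
    intro a b h
    have := congrArg String.toList h
    simpa using this
  have hT1 : ∀ t ∈ T, ∃ c, t = String.ofList [c] := by
    intro t ht
    have hlen := h1 t ht
    cases hc : t.toList with
    | nil => simp [hc] at hlen
    | cons a tl =>
      cases tl with
      | nil => exact ⟨a, by rw [← hc]; simp⟩
      | cons b tl' => simp [hc] at hlen
  have hnodup : T.Nodup := h2.imp (fun h => ne_of_lt h)
  rw [Bool.eq_iff_iff]
  constructor
  · intro h
    rw [Bool.and_eq_true] at h
    obtain ⟨c1, c2⟩ := h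
    rw [List.all_eq_true] at c1 c2
    have hperm : (s.toList.map (fun c => String.ofList [c])).Perm T := by
      rw [List.perm_iff_count]
      intro a
      by_cases ha : a ∈ T
      · obtain ⟨c, rfl⟩ := hT1 a ha
        have hcnt := c2 _ ha
        rw [beq_iff_eq, PySem.Str.count_eq] at hcnt
        have : PySem.Chars.count s.toList [c] = 1 := by simpa using hcnt
        rw [chars_count_singleton] at this
        rw [List.count_map_of_injective s.toList _ hfinj c, this,
          List.count_eq_one_of_mem hnodup ha]
      · rw [List.count_eq_zero.mpr ha, List.count_eq_zero]
        intro hmem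
        have := c1 a hmem
        simp at this
        exact ha this
    rw [beq_iff_eq]
    exact PySem.List.sorted_eq_of_perm_of_pairwise_lt _ T (fun x => x) hperm.symm h2
  · intro h
    rw [beq_iff_eq] at h
    have hperm : (s.toList.map (fun c => String.ofList [c])).Perm T := by
      have := PySem.List.sorted_perm (s.toList.map (fun c => String.ofList [c])) (fun x : String => x) false
      rw [h] at this
      exact this.symm
    rw [Bool.and_eq_true]
    constructor
    · rw [List.all_eq_true]
      intro x hx
      simpa using hperm.subset hx
    · rw [List.all_eq_true]
      intro t ht
      obtain ⟨c, rfl⟩ := hT1 t ht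
      rw [beq_iff_eq, PySem.Str.count_eq]
      have : PySem.Chars.count s.toList [c] = 1 := by
        rw [chars_count_singleton,
          ← List.count_map_of_injective s.toList _ hfinj c,
          List.perm_iff_count.mp hperm, List.count_eq_one_of_mem hnodup ht]
      simpa using this

lemma pairwise_lt_of_toList_lt (T : List String)
    (h : List.Pairwise (fun a b => a.toList < b.toList) T) :
    List.Pairwise (fun a b : String => a < b) T :=
  h.imp (fun hab => String.lt_iff_toList_lt.mpr hab)

-- The two programs agree on every digit string.
lemma pandigital_key (s : String) :
    ((s.toList.map (fun c => String.ofList [c])).all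
        (fun j => (((PySem.List.pyRange 1 (PySem.Str.len s + 1)).map (fun j => PySem.Int.toStr j)).contains j))
      && ((PySem.List.pyRange 1 (PySem.Str.len s + 1)).map (fun j => PySem.Int.toStr j)).all
        (fun j => PySem.Str.count s j == 1))
    = (PySem.List.sorted (s.toList.map (fun c => String.ofList [c])) (fun x => x) false
        == (PySem.List.pyRange 1 (PySem.Str.len s + 1)).map (fun j => PySem.Int.toStr j)) := by
  have hlen : PySem.Str.len s = (s.toList.length : Int) := rfl
  rw [hlen]
  by_cases h9 : s.toList.length ≤ 9
  · obtain ⟨n, hn⟩ : ∃ n, s.toList.length = n := ⟨_, rfl⟩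
    rw [hn] at h9 ⊢
    interval_cases n <;>
      exact pandigital_generic s _ (by decide) (pairwise_lt_of_toList_lt _ (by decide))
  · -- at least ten characters: both sides are false
    have h10 : 9 < s.toList.length := by omega
    have hmem10 : PySem.Int.toStr 10 ∈
        (PySem.List.pyRange 1 ((s.toList.length : Int) + 1)).map (fun j => PySem.Int.toStr j) := by
      refine List.mem_map.mpr ⟨10, ?_, rfl⟩
      rw [PySem.List.mem_pyRange_iff_of_pos (by norm_num)]
      refine ⟨by norm_num, by omega, ⟨9, by norm_num⟩⟩
    have hrhs : (PySem.List.sorted (s.toList.map (fun c => String.ofList [c])) (fun x => x) false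
        == (PySem.List.pyRange 1 ((s.toList.length : Int) + 1)).map (fun j => PySem.Int.toStr j)) = false := by
      rw [beq_eq_false_iff_ne]
      intro heq
      have hm : PySem.Int.toStr 10 ∈
          PySem.List.sorted (s.toList.map (fun c => String.ofList [c])) (fun x : String => x) false := by
        rw [heq]; exact hmem10
      rw [PySem.List.mem_sorted] at hm
      obtain ⟨c, _, hc⟩ := List.mem_map.mp hm
      have := congrArg String.toList hc
      have h10l : (PySem.Int.toStr 10).toList = ['1', '0'] := by decide
      rw [h10l] at this
      simp at this
    rw [hrhs]
    by_contra hl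
    rw [Bool.not_eq_false, Bool.and_eq_true] at hl
    obtain ⟨c1, c2⟩ := hl
    rw [List.all_eq_true] at c1 c2
    have hcnt := c2 _ hmem10
    rw [beq_iff_eq, PySem.Str.count_eq] at hcnt
    have h10l : (PySem.Int.toStr 10).toList = ['1', '0'] := by decide
    rw [h10l] at hcnt
    have hinf : ['1', '0'] <:+: s.toList :=
      infix_of_count_eq_one _ _ (by simp) hcnt
    have h0 : '0' ∈ s.toList := hinf.subset (by simp)
    have hc1 := c1 (String.ofList ['0']) (List.mem_map_of_mem h0)
    simp only [List.contains_eq_mem, decide_eq_true_eq] at hc1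
    obtain ⟨j, hjmem, hj⟩ := List.mem_map.mp hc1
    rw [PySem.List.mem_pyRange_iff_of_pos (by norm_num)] at hjmem
    exact toStr_ne_zero j hjmem.1 (by rw [hj])

-- ===== VERDICT (by name: the statement is the Claim_ definition above) =====
theorem pandigital_spec : Claim_equal_pandigital := by
  intro i _
  unfold Spec_pandigital pandigital pandigital_alt
  simp only []
  rw [pandigital_key (PySem.Int.toStr i)]
  split <;> simp_all
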